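-- pv_equiv track=rewrite | github.com/selfheart/study | 24MM/TUS/TUS/tus-sdk-release-main/bin/pub_tool/sdpv3/sdpv3ctx.py | parse_rxswins
-- ===== SOURCE A (Python) =====
-- from typing import List
--
-- def parse_rxswins(input_rxswins: List):
--     ret = []
--     if input_rxswins is not None:
--         err_msg = "RXSWIN should includes one and only one space character and not need to add escaped character input:"
--         if len(input_rxswins) % 2 != 0:
--             raise ValueError(
--                 f"{err_msg}{input_rxswins}")
--         for i in range(0, len(input_rxswins), 2):
--             # already escaped but it is not acceptable
--             if ' ' in input_rxswins[i] or ' ' in input_rxswins[i + 1]: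
--                 raise ValueError(
--                     f"{err_msg}{input_rxswins}")
--
--             ret.append(' '.join(
--                 [input_rxswins[i], input_rxswins[i + 1]]))
--     return ret
-- ===== SOURCE B (Python) =====
-- def parse_rxswins(input_rxswins):
--     if input_rxswins is None:
--         return []
--     err_msg = "RXSWIN should includes one and only one space character and not need to add escaped character input:"
--     if len(input_rxswins) % 2 != 0 or any(' ' in x for x in input_rxswins):
--         raise ValueError(f"{err_msg}{input_rxswins}")
--     it = iter(input_rxswins)
--     return [' '.join(pair) for pair in zip(it, it)]
-- ===== Notes on version B (the rewrite author's own statement) =====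
-- stated objective: idiomatic
-- what changed: Replaces A's fused index loop (validate-and-append per pair with an accumulator) by a single whole-list validation pass (any) followed by a separate assembly pass that zips an iterator with itself to join consecutive pairs.
import Mathlib
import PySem

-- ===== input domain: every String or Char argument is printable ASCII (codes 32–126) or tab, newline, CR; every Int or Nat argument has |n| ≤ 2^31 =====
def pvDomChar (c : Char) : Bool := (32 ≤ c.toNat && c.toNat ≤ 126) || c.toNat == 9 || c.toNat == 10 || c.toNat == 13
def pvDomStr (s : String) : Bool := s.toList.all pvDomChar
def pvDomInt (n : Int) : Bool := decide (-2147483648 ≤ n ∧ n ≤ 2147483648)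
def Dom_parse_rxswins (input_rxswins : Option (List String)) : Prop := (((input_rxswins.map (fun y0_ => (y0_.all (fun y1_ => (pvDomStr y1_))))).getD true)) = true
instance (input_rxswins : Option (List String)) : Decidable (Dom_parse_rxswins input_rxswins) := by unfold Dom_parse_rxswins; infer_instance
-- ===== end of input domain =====

-- B splits A's fused validate-and-append index loop into a whole-list validation pass plus a separate pair-zipping assembly pass (same cost, more idiomatic).


-- ===== PORT A =====
-- the 'for i in range(0, len, 2)' loop, two elements at a time, with the 'ret' accumulator;
-- the raise branch (dead under Pre_) yields the accumulated ret
def parseA_loop (acc : List String) : List String → List String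
  | a :: b :: rest =>
      if PySem.Str.isIn " " a || PySem.Str.isIn " " b then acc
      else parseA_loop (acc ++ [PySem.Str.join " " [a, b]]) rest
  | _ => acc

def parse_rxswins (input_rxswins : Option (List String)) : List String :=
  match input_rxswins with
  | none => []
  | some xs =>
      if xs.length % 2 ≠ 0 then []   -- raise ValueError (excluded by Pre_)
      else parseA_loop [] xs

-- ===== PORT B =====
-- zip(it, it) on one iterator = consecutive disjoint pairs
def pairsB : List String → List (String × String)
  | a :: b :: rest => (a, b) :: pairsB rest
  | _ => []

def parse_rxswins_alt (input_rxswins : Option (List String)) : List String :=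
  match input_rxswins with
  | none => []
  | some xs =>
      if xs.length % 2 ≠ 0 || xs.any (fun x => PySem.Str.isIn " " x) then []  -- raise ValueError (excluded by Pre_)
      else (pairsB xs).map (fun p => PySem.Str.join " " [p.1, p.2])

-- ===== PRECONDITION & SPEC =====
-- Pre_ excludes exactly the inputs where A raises ValueError: odd length, or some element containing a space.
def Pre_parse_rxswins (input_rxswins : Option (List String)) : Prop :=
  match input_rxswins with
  | none => True
  | some xs => xs.length % 2 = 0 ∧ ∀ x ∈ xs, PySem.Str.isIn " " x = false

instance (input_rxswins : Option (List String)) : Decidable (Pre_parse_rxswins input_rxswins) := by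
  unfold Pre_parse_rxswins; cases input_rxswins <;> infer_instance

def pvWitness_parse_rxswins : Option (List String) := some ["JP_123", "v1.0", "EU-9", "v2"]

def Spec_parse_rxswins (input_rxswins : Option (List String)) (out : List String) : Prop := out = parse_rxswins_alt input_rxswins
instance (input_rxswins : Option (List String)) (out : List String) : Decidable (Spec_parse_rxswins input_rxswins out) := by unfold Spec_parse_rxswins; infer_instance

-- ===== CLAIM (what is proved, stated in full; the proofs are below) =====
def Claim_equal_parse_rxswins : Prop := ∀ (input_rxswins : Option (List String)), Dom_parse_rxswins input_rxswins → Pre_parse_rxswins input_rxswins → Spec_parse_rxswins input_rxswins (parse_rxswins input_rxswins)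

-- ===== LEMMAS AND PROOFS =====
lemma parseA_loop_eq : ∀ (xs : List String), (∀ x ∈ xs, PySem.Str.isIn " " x = false) → ∀ (acc : List String),
    parseA_loop acc xs = acc ++ (pairsB xs).map (fun p => PySem.Str.join " " [p.1, p.2])
  | [], _, acc => by simp [parseA_loop, pairsB]
  | [a], _, acc => by simp [parseA_loop, pairsB]
  | a :: b :: rest, h, acc => by
      have ha := h a (by simp)
      have hb := h b (by simp)
      rw [parseA_loop, ha, hb]
      simp only [Bool.or_self, Bool.false_eq_true, if_false, pairsB, List.map_cons]
      rw [parseA_loop_eq rest (fun x hx => h x (by simp [hx]))]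
      simp

-- ===== VERDICT (by name: the statement is the Claim_ definition above) =====
theorem parse_rxswins_spec : Claim_equal_parse_rxswins := by
  intro input_rxswins _ hpre
  unfold Spec_parse_rxswins parse_rxswins parse_rxswins_alt
  cases input_rxswins with
  | none => rfl
  | some xs =>
      dsimp only
      obtain ⟨heven, hspace⟩ := hpre
      have hany : xs.any (fun x => PySem.Str.isIn " " x) = false := by
        simp only [List.any_eq_false]
        intro x hx
        rw [hspace x hx]
        simp
      have h1 : ¬ xs.length % 2 ≠ 0 := by omega
      rw [if_neg h1, parseA_loop_eq xs hspace [], List.nil_append]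
      rw [if_neg (by rw [hany, decide_eq_false h1]; simp)]
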